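-- pv_equiv track=rewrite | github.com/alexandraback/datacollection | solutions_5738606668808192_1/Python/Clarissa/jamcoin.py | convert_bitstring_to_base
-- ===== SOURCE A (Python) =====
-- def convert_bitstring_to_base(bitstring, base):
--     """
--     Converts a bitstring of 0s and 1s to a given base
--
--     param: bitstring, an integer containing only 0s and 1s
--     param: base, the base to which to convert, 2<=base<=10
--     return: an integer that is the equivalent of bitstring in the given base
--     """
--
--     if base == 10:
--         return bitstring
--
--     index_from_right = 0
--     converted_value = 0
--
--     while bitstring > 0:
--         bit = bitstring%10
--         converted_value += bit*base**index_from_right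
--         bitstring -= bit
--         bitstring //= 10
--         index_from_right += 1
--
--     return converted_value
-- ===== SOURCE B (Python) =====
-- def convert_bitstring_to_base(bitstring, base):
--     if base == 10:
--         return bitstring
--     digits = []
--     n = bitstring
--     while n > 0:
--         digits.append(n % 10)
--         n //= 10
--     value = 0
--     for d in reversed(digits):
--         value = value * base + d
--     return value
-- ===== Notes on version B (the rewrite author's own statement) =====
-- stated objective: alternative
-- what changed: B first extracts the decimal digits into a list and then folds over them most-significant-first with Horner's rule (value = value*base + digit), instead of A's single loop that maintains a position counter and accumulates digit*base**index with an exponentiation per digit.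
import Mathlib
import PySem

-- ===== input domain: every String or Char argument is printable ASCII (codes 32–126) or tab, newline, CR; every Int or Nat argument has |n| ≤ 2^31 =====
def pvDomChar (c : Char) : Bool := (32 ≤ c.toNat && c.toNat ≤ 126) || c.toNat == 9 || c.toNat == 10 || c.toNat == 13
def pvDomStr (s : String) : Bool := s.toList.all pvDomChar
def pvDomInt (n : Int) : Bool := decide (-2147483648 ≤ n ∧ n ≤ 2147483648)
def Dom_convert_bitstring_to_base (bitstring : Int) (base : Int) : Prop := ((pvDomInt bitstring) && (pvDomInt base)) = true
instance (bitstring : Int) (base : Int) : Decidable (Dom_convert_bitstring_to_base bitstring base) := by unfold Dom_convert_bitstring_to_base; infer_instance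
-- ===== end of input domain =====

-- B re-reads A's digit loop as: collect the decimal digits, then one Horner fold
-- most-significant-first (no per-digit exponentiation); an alternative of the same cost.

-- termination facts for the two loops (cited by name in decreasing_by)
theorem pvStepA_lt (n : Int) (h : 0 < n) :
    (PySem.Int.floordiv (n - PySem.Int.mod n 10) 10).toNat < n.toNat := by
  rw [PySem.Int.mod_eq_emod_of_pos (by norm_num), PySem.Int.floordiv_eq_ediv_of_pos (by norm_num)]
  omega

theorem pvStepB_lt (n : Int) (h : 0 < n) :
    (PySem.Int.floordiv n 10).toNat < n.toNat := by
  rw [PySem.Int.floordiv_eq_ediv_of_pos (by norm_num)]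
  omega

-- ===== PORT A =====
-- the 'while bitstring > 0' loop of A, state (bitstring, index_from_right, converted_value)
def pvLoopA (base : Int) (bitstring : Int) (index_from_right : Nat) (converted_value : Int) : Int :=
  if h : bitstring > 0 then
    let bit := PySem.Int.mod bitstring 10
    pvLoopA base (PySem.Int.floordiv (bitstring - bit) 10) (index_from_right + 1)
      (converted_value + bit * base ^ index_from_right)
  else converted_value
termination_by bitstring.toNat
decreasing_by exact pvStepA_lt bitstring h

def convert_bitstring_to_base (bitstring : Int) (base : Int) : Int :=
  if base == 10 then bitstring
  else pvLoopA base bitstring 0 0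

-- ===== PORT B =====
-- the 'while n > 0: digits.append(n % 10); n //= 10' loop of B (digits is the accumulator)
def pvDigitsB (n : Int) (digits : List Int) : List Int :=
  if h : n > 0 then pvDigitsB (PySem.Int.floordiv n 10) (digits ++ [PySem.Int.mod n 10])
  else digits
termination_by n.toNat
decreasing_by exact pvStepB_lt n h

def convert_bitstring_to_base_alt (bitstring : Int) (base : Int) : Int :=
  if base == 10 then bitstring
  else (pvDigitsB bitstring []).reverse.foldl (fun value d => value * base + d) 0

-- ===== PRECONDITION & SPEC =====
def Spec_convert_bitstring_to_base (bitstring : Int) (base : Int) (out : Int) : Prop := out = convert_bitstring_to_base_alt bitstring base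
instance (bitstring : Int) (base : Int) (out : Int) : Decidable (Spec_convert_bitstring_to_base bitstring base out) := by unfold Spec_convert_bitstring_to_base; infer_instance

-- ===== CLAIM (what is proved, stated in full; the proofs are below) =====
def Claim_equal_convert_bitstring_to_base : Prop := ∀ (bitstring : Int) (base : Int), Dom_convert_bitstring_to_base bitstring base → Spec_convert_bitstring_to_base bitstring base (convert_bitstring_to_base bitstring base)

-- ===== LEMMAS AND PROOFS =====

-- Horner value computed by B from n's decimal digits
def pvHorner (base n : Int) : Int :=
  (pvDigitsB n []).reverse.foldl (fun value d => value * base + d) 0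

theorem pvDigitsB_acc (n : Int) (digits : List Int) :
    pvDigitsB n digits = digits ++ pvDigitsB n [] := by
  by_cases h : n > 0
  · conv_lhs => rw [pvDigitsB]
    conv_rhs => rw [pvDigitsB]
    simp only [h, dite_true]
    rw [pvDigitsB_acc (PySem.Int.floordiv n 10) (digits ++ [PySem.Int.mod n 10]),
        pvDigitsB_acc (PySem.Int.floordiv n 10) ([] ++ [PySem.Int.mod n 10])]
    simp
  · conv_lhs => rw [pvDigitsB]
    conv_rhs => rw [pvDigitsB]
    simp [h]
termination_by n.toNat
decreasing_by all_goals exact pvStepB_lt n h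

theorem pvHorner_pos (base n : Int) (h : 0 < n) :
    pvHorner base n = pvHorner base (PySem.Int.floordiv n 10) * base + PySem.Int.mod n 10 := by
  unfold pvHorner
  conv_lhs => rw [pvDigitsB]
  simp only [h, dite_true]
  rw [pvDigitsB_acc]
  simp [List.foldl_append]

theorem pvHorner_nonpos (base n : Int) (h : ¬ n > 0) : pvHorner base n = 0 := by
  unfold pvHorner
  rw [pvDigitsB]
  simp [h]

theorem pvStepA_eq (n : Int) :
    PySem.Int.floordiv (n - PySem.Int.mod n 10) 10 = PySem.Int.floordiv n 10 := by
  rw [PySem.Int.mod_eq_emod_of_pos (by norm_num),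
      PySem.Int.floordiv_eq_ediv_of_pos (by norm_num),
      PySem.Int.floordiv_eq_ediv_of_pos (by norm_num)]
  omega

theorem pvLoopA_eq (base n : Int) (idx : Nat) (acc : Int) :
    pvLoopA base n idx acc = acc + pvHorner base n * base ^ idx := by
  by_cases h : n > 0
  · rw [pvLoopA]
    simp only [h, dite_true]
    rw [pvStepA_eq, pvLoopA_eq base (PySem.Int.floordiv n 10) (idx + 1),
        pvHorner_pos base n h]
    ring
  · rw [pvLoopA]
    simp [h, pvHorner_nonpos base n h]
termination_by n.toNat
decreasing_by simpa [pvStepA_eq] using pvStepB_lt n h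

-- ===== VERDICT (by name: the statement is the Claim_ definition above) =====
theorem convert_bitstring_to_base_spec : Claim_equal_convert_bitstring_to_base := by
  intro bitstring base _
  unfold Spec_convert_bitstring_to_base convert_bitstring_to_base convert_bitstring_to_base_alt
  by_cases hb : base == 10
  · simp [hb]
  · simp only [hb, Bool.false_eq_true, if_false]
    rw [pvLoopA_eq]
    show 0 + pvHorner base bitstring * base ^ 0 = pvHorner base bitstring
    ring
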